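-- pv_equiv track=rewrite | github.com/d4ndres/Reader-FacEle | modules/SignalProcessor.py | selectRangeTable
-- ===== SOURCE A (Python) =====
-- def selectRangeTable(listCandidates, threshold=100):
--   rangeTable = []
--   start = listCandidates[0]
--   for i in range(1, len(listCandidates)):
--     current_value = listCandidates[i]
--     prev_value = listCandidates[i-1]
--
--     if current_value - prev_value < threshold:
--       continue
--     else:
--       rangeTable.append((start, prev_value))
--       start = current_value
--
--   rangeTable.append((start, listCandidates[-1]))
--
--   #biggest range
--   return max(rangeTable, key=lambda x: x[1] - x[0])
-- ===== SOURCE B (Python) =====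
-- def selectRangeTable(listCandidates, threshold=100):
--   # recursive decomposition: split off the segment before the first gap >= threshold,
--   # recurse on the remainder; keep the earlier segment on ties (Python max is first-maximal)
--   first = listCandidates[0]
--   for i in range(1, len(listCandidates)):
--     if listCandidates[i] - listCandidates[i-1] >= threshold:
--       head = (first, listCandidates[i-1])
--       rest = selectRangeTable(listCandidates[i:], threshold)
--       return head if head[1] - head[0] >= rest[1] - rest[0] else rest
--   return (first, listCandidates[-1])
-- ===== Notes on version B (the rewrite author's own statement) =====
-- stated objective: alternative
-- what changed: Replaces A's build-a-range-table-then-max with head/tail recursion: split off the segment before the first gap >= threshold, recurse on the remaining candidates, and keep the earlier segment on span ties (matching Python max's first-maximal rule); no intermediate table is built.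
import Mathlib
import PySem

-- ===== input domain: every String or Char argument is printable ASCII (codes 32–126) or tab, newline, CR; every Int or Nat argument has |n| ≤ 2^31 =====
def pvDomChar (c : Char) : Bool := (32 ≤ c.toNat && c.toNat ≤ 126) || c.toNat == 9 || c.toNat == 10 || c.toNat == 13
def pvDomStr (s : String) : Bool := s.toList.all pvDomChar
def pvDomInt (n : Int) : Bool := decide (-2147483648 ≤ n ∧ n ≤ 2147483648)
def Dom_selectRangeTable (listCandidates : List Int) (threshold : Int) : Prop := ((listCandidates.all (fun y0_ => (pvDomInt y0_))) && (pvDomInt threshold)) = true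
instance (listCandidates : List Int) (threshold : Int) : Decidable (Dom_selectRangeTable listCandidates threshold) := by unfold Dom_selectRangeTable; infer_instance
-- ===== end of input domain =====

-- B replaces A's build-a-range-table-then-max with a recursion that splits at the first
-- gap >= threshold and recurses on the remainder (alternative decomposition; same result).

-- ===== PORT A =====
-- literal transliteration of A: build rangeTable over indices 1..len-1, append the last range, then max by span
def selectRangeTable (listCandidates : List Int) (threshold : Int) : Int × Int :=
  match listCandidates with
  | [] => (0, 0)  -- Python raises IndexError on listCandidates[0]; excluded by Pre_
  | x :: _ =>
    let st := (PySem.List.pyRange 1 (listCandidates.length) 1).foldl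
      (fun (acc : List (Int × Int) × Int) i =>
        let current_value := PySem.List.pyGetD listCandidates i 0
        let prev_value := PySem.List.pyGetD listCandidates (i - 1) 0
        if current_value - prev_value < threshold then acc
        else (acc.1 ++ [(acc.2, prev_value)], current_value)) ([], x)
    let rangeTable := st.1 ++ [(st.2, PySem.List.pyGetD listCandidates (-1) 0)]
    (PySem.List.max? rangeTable (fun p => p.2 - p.1)).getD (0, 0)

-- ===== PORT B =====
-- Source B's scan for the first gap (for-loop with prev = listCandidates[i-1]) becomes a walk
-- carrying (first, prev); the recursive call selectRangeTable(listCandidates[i:]) is the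
-- branch altRec t c c cs (first = prev = head of the slice, tail = rest of the slice).
def altRec (t first prev : Int) : List Int → Int × Int
  | [] => (first, prev)
  | c :: cs =>
    if c - prev ≥ t then
      let head := (first, prev)
      let rest := altRec t c c cs
      if head.2 - head.1 ≥ rest.2 - rest.1 then head else rest
    else altRec t first c cs

def selectRangeTable_alt (listCandidates : List Int) (threshold : Int) : Int × Int :=
  match listCandidates with
  | [] => (0, 0)  -- listCandidates[0] raises in B too; excluded by Pre_
  | x :: rest => altRec threshold x x rest

-- ===== PRECONDITION & SPEC =====
-- Pre_ excludes exactly the empty list, on which A (and B) raise IndexError.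
def Pre_selectRangeTable (listCandidates : List Int) (threshold : Int) : Prop := listCandidates ≠ []
instance (listCandidates : List Int) (threshold : Int) : Decidable (Pre_selectRangeTable listCandidates threshold) := by unfold Pre_selectRangeTable; infer_instance
def pvWitness_selectRangeTable : List Int × Int := ([1, 2, 300, 301], 100)

def Spec_selectRangeTable (listCandidates : List Int) (threshold : Int) (out : Int × Int) : Prop := out = selectRangeTable_alt listCandidates threshold
instance (listCandidates : List Int) (threshold : Int) (out : Int × Int) : Decidable (Spec_selectRangeTable listCandidates threshold out) := by unfold Spec_selectRangeTable; infer_instance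

-- ===== CLAIM (what is proved, stated in full; the proofs are below) =====
def Claim_equal_selectRangeTable : Prop := ∀ (listCandidates : List Int) (threshold : Int), Dom_selectRangeTable listCandidates threshold → Pre_selectRangeTable listCandidates threshold → Spec_selectRangeTable listCandidates threshold (selectRangeTable listCandidates threshold)

-- ===== LEMMAS AND PROOFS =====

-- the A-side loop, restated as a structural walk over adjacent (prev, cur) pairs
def pairFold (g : List (Int × Int) × Int → Int → Int → List (Int × Int) × Int) :
    Int → List Int → List (Int × Int) × Int → List (Int × Int) × Int
  | _, [], acc => acc
  | prev, c :: cs, acc => pairFold g c cs (g acc prev c)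

-- shifting a cons off the list shifts pyGetD by one (nonnegative index)
theorem pyGetD_cons_nat (x : Int) (t : List Int) (k : Nat) (d : Int) :
    PySem.List.pyGetD (x :: t) ((k : Int) + 1) d = PySem.List.pyGetD t (k : Int) d := by
  simp [PySem.List.pyGetD, PySem.List.pyGet?, PySem.List.pyIdx?]
  split_ifs with h1 h2 h3 <;> try omega
  · simp
  · simp

theorem pyGetD_cons_zero (x : Int) (t : List Int) (d : Int) :
    PySem.List.pyGetD (x :: t) 0 d = x := by
  unfold PySem.List.pyGetD PySem.List.pyGet? PySem.List.pyIdx?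
  rw [if_pos le_rfl, if_pos (show (0:Int) < ((x :: t).length : Int) by simp)]
  simp

theorem pyGetD_neg_one_getLast (l : List Int) (d : Int) (h : l ≠ []) :
    PySem.List.pyGetD l (-1) d = l.getLast h := by
  have hn : 0 < l.length := List.length_pos_iff.mpr h
  unfold PySem.List.pyGetD PySem.List.pyGet? PySem.List.pyIdx?
  rw [if_neg (by omega : ¬ (0:Int) ≤ -1), if_pos (show -(l.length:Int) ≤ -1 by omega)]
  have hk : l.length - ((-(-1 : Int)).toNat) = l.length - 1 := by norm_num
  rw [hk]
  simp only [Option.bind]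
  rw [List.getElem?_eq_getElem (by omega)]
  simp [List.getLast_eq_getElem]

-- A's index loop over range(1, len) equals the structural pair walk
theorem idx_fold (g : List (Int × Int) × Int → Int → Int → List (Int × Int) × Int)
    (x : Int) (rest : List Int) (acc : List (Int × Int) × Int) :
    (PySem.List.pyRange 1 ((x :: rest).length : Int) 1).foldl
        (fun a i => g a (PySem.List.pyGetD (x :: rest) (i - 1) 0) (PySem.List.pyGetD (x :: rest) i 0)) acc
      = pairFold g x rest acc := by
  induction rest generalizing x acc with
  | nil => simp [PySem.List.pyRange_one_eq_nil, pairFold]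
  | cons c cs ih =>
    have hlen : ((x :: c :: cs).length : Int) = (cs.length : Int) + 2 := by simp; omega
    rw [hlen, PySem.List.pyRange_one_cons (by omega)]
    simp only [List.foldl_cons]
    have e1 : PySem.List.pyGetD (x :: c :: cs) (1 - 1) 0 = x := by
      norm_num [pyGetD_cons_zero]
    have e2 : PySem.List.pyGetD (x :: c :: cs) 1 0 = c := by
      have h0 := pyGetD_cons_nat x (c :: cs) 0 0
      norm_num [pyGetD_cons_zero] at h0
      exact h0
    rw [e1, e2]
    -- shift the remaining range 2..len down to 1..len-1 over the tail list
    have hsh : ∀ (a : List (Int × Int) × Int),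
        (PySem.List.pyRange (1 + 1) ((cs.length : Int) + 2) 1).foldl
          (fun a i => g a (PySem.List.pyGetD (x :: c :: cs) (i - 1) 0) (PySem.List.pyGetD (x :: c :: cs) i 0)) a
        = (PySem.List.pyRange 1 ((c :: cs).length : Int) 1).foldl
          (fun a i => g a (PySem.List.pyGetD (c :: cs) (i - 1) 0) (PySem.List.pyGetD (c :: cs) i 0)) a := by
      intro a
      have hmap : PySem.List.pyRange (1 + 1) ((cs.length : Int) + 2) 1
          = (PySem.List.pyRange 1 ((c :: cs).length : Int) 1).map (· + 1) := by
        simp [PySem.List.pyRange_one]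
        intro k _
        omega
      rw [hmap, List.foldl_map]
      apply PySem.List.foldl_congr_mem
      intro a' i hi
      have hi' : 1 ≤ i := (PySem.List.mem_pyRange_one.mp hi).1
      have h1 : PySem.List.pyGetD (x :: c :: cs) (i + 1 - 1) 0 = PySem.List.pyGetD (c :: cs) (i - 1) 0 := by
        have : i + 1 - 1 = ((i - 1).toNat : Int) + 1 := by omega
        rw [this, pyGetD_cons_nat]
        congr 1; omega
      have h2 : PySem.List.pyGetD (x :: c :: cs) (i + 1) 0 = PySem.List.pyGetD (c :: cs) i 0 := by
        have : i + 1 = ((i.toNat : Int)) + 1 := by omega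
        rw [this, pyGetD_cons_nat]
        congr 1; omega
      rw [h1, h2]
    rw [hsh (g acc x c)]
    rw [ih c (g acc x c)]
    rfl

-- the running-best step of Python's max (first maximal by span)
def bestStep (acc : Option (Int × Int)) (x : Int × Int) : Option (Int × Int) :=
  match acc with
  | none => some x
  | some m => if m.2 - m.1 < x.2 - x.1 then some x else some m

-- close a range against a running best (first-maximal: existing best wins ties)
def altClose (best : Option (Int × Int)) (start prev : Int) : Int × Int :=
  match best with
  | none => (start, prev)
  | some b => if prev - start > b.2 - b.1 then (start, prev) else b

-- combine a running best with the first-maximal of the remaining segments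
def comb : Option (Int × Int) → (Int × Int) → Int × Int
  | none, r => r
  | some m, r => if m.2 - m.1 ≥ r.2 - r.1 then m else r

theorem max?_eq_foldl_bestStep (xs : List (Int × Int)) :
    PySem.List.max? xs (fun q => q.2 - q.1) = xs.foldl bestStep none := by
  unfold PySem.List.max?
  apply PySem.List.foldl_congr_mem
  intro acc x _
  cases acc <;> rfl

theorem bestStep_eq_close (b : Option (Int × Int)) (s p : Int) :
    bestStep b (s, p) = some (altClose b s p) := by
  cases b <;> simp only [bestStep, altClose, gt_iff_lt, apply_ite] <;> (try split_ifs) <;> rfl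

-- Python's first-maximal max over rt ++ [p] is exactly one altClose step on the running best
theorem max?_append_eq (rt : List (Int × Int)) (s p : Int) :
    PySem.List.max? (rt ++ [(s, p)]) (fun q => q.2 - q.1)
      = some (altClose (PySem.List.max? rt (fun q => q.2 - q.1)) s p) := by
  rw [max?_eq_foldl_bestStep, max?_eq_foldl_bestStep, List.foldl_append]
  simp only [List.foldl_cons, List.foldl_nil]
  rw [bestStep_eq_close]

theorem altClose_eq_comb (b : Option (Int × Int)) (s p : Int) :
    altClose b s p = comb b (s, p) := by
  cases b with
  | none => rfl
  | some m => simp only [altClose, comb]; split_ifs <;> first | rfl | omega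

-- pushing a freshly closed segment into the running best commutes with comb
theorem comb_step (b : Option (Int × Int)) (s p : Int) (r : Int × Int) :
    comb (some (altClose b s p)) r
      = comb b (if p - s ≥ r.2 - r.1 then (s, p) else r) := by
  cases b with
  | none => simp only [altClose, comb]
  | some m => simp only [altClose, comb]; split_ifs <;> first | rfl | omega

-- the A-side loop body
def aBody (t : Int) (acc : List (Int × Int) × Int) (prev cur : Int) : List (Int × Int) × Int :=
  if cur - prev < t then acc else (acc.1 ++ [(acc.2, prev)], cur)

-- main invariant: A's pair walk followed by closing-and-max equals comb of the table's best with B's recursion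
theorem inv (t : Int) (rest : List Int) :
    ∀ (prev s : Int) (rt : List (Int × Int)),
      (PySem.List.max? ((pairFold (aBody t) prev rest (rt, s)).1
          ++ [((pairFold (aBody t) prev rest (rt, s)).2, (prev :: rest).getLast (by simp))])
          (fun q => q.2 - q.1)).getD (0, 0)
        = comb (PySem.List.max? rt (fun q => q.2 - q.1)) (altRec t s prev rest) := by
  induction rest with
  | nil =>
    intro prev s rt
    simp [pairFold, altRec, max?_append_eq, altClose_eq_comb]
  | cons c cs ih =>
    intro prev s rt
    have hlast : (prev :: c :: cs).getLast (by simp) = (c :: cs).getLast (by simp) := by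
      simp [List.getLast_cons]
    simp only [pairFold, altRec, aBody]
    by_cases hc : c - prev < t
    · rw [if_pos hc, if_neg (by omega)]
      rw [← ih c s rt]
      simp [hlast]
    · rw [if_neg hc, if_pos (by omega)]
      rw [← comb_step, ← max?_append_eq rt s prev, ← ih c c (rt ++ [(s, prev)])]
      simp [hlast]

-- ===== VERDICT (by name: the statement is the Claim_ definition above) =====
theorem selectRangeTable_spec : Claim_equal_selectRangeTable := by
  intro l t _ hpre
  unfold Spec_selectRangeTable
  match l, hpre with
  | x :: rest, _ =>
    show selectRangeTable (x :: rest) t = selectRangeTable_alt (x :: rest) t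
    unfold selectRangeTable selectRangeTable_alt
    simp only
    rw [idx_fold (fun a prev cur => if cur - prev < t then a else (a.1 ++ [(a.2, prev)], cur)) x rest ([], x)]
    rw [pyGetD_neg_one_getLast (x :: rest) 0 (by simp)]
    have h := inv t rest x x []
    have h0 : PySem.List.max? ([] : List (Int × Int)) (fun q => q.2 - q.1) = none := rfl
    rw [h0] at h
    simp only [comb] at h
    exact h
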